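-- pv_equiv track=rewrite | github.com/Geo-fs/Minisecscan | .github/actions/minisecscan/run.py | score_findings
-- ===== SOURCE A (Python) =====
-- def score_findings(findings):
--     s = 100
--     for f in findings:
--         if f["severity"] == "HIGH": s -= 15
--         elif f["severity"] == "MEDIUM": s -= 7
--         elif f["severity"] == "LOW": s -= 2
--     s = max(0, s)
--     if s >= 90: grade = "A"
--     elif s >= 75: grade = "B"
--     elif s >= 60: grade = "C"
--     else: grade = "D"
--     return s, grade
-- ===== SOURCE B (Python) =====
-- def score_findings(findings):
--     sevs = [f["severity"] for f in findings]
--     s = max(0, 100 - 15 * sevs.count("HIGH") - 7 * sevs.count("MEDIUM") - 2 * sevs.count("LOW"))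
--     grade = "DCBA"[(s >= 60) + (s >= 75) + (s >= 90)]
--     return s, grade
-- ===== Notes on version B (the rewrite author's own statement) =====
-- stated objective: simpler
-- what changed: B tabulates severity counts once and computes the score in closed form, then derives the grade by summing threshold comparisons into an index of "DCBA" instead of A's per-element subtraction loop and if/elif grade ladder.
import Mathlib
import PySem

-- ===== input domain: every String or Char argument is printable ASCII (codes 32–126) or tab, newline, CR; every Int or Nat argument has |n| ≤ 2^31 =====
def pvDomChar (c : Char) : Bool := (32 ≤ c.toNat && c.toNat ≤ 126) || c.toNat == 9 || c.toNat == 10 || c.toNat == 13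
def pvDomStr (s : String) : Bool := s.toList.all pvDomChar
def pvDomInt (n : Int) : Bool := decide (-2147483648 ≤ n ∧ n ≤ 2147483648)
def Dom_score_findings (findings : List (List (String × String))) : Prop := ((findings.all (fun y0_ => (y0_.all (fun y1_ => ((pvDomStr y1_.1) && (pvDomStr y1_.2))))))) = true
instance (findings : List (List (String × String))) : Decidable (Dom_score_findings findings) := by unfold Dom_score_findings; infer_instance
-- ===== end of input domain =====

-- B replaces A's per-element subtraction loop and grade ladder by a count-then-closed-form
-- score and a threshold-sum index into "DCBA"; equivalence is about the return value only.

-- ===== PORT A =====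
def score_findings (findings : List (List (String × String))) : Int × String :=
  -- 's = 100; for f in findings: if/elif ladder on f["severity"]'; under Pre_ the key is
  -- present, so the getD "" default is never the value Python raised on
  let s : Int := findings.foldl (fun s f =>
    let sev := ((PySem.Dict.mk f).get? "severity").getD ""
    if sev = "HIGH" then s - 15
    else if sev = "MEDIUM" then s - 7
    else if sev = "LOW" then s - 2
    else s) 100
  let s := max 0 s
  let grade := if s ≥ 90 then "A" else if s ≥ 75 then "B" else if s ≥ 60 then "C" else "D"
  (s, grade)

-- ===== PORT B =====
def score_findings_alt (findings : List (List (String × String))) : Int × String :=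
  let sevs := findings.map (fun f => ((PySem.Dict.mk f).get? "severity").getD "")
  let s : Int := max 0 (100 - 15 * (sevs.count "HIGH" : Int) - 7 * (sevs.count "MEDIUM" : Int) - 2 * (sevs.count "LOW" : Int))
  -- '"DCBA"[(s >= 60) + (s >= 75) + (s >= 90)]': Python's 1-char-string indexing, exact via pyGet?
  let k : Int := (if s ≥ 60 then 1 else 0) + (if s ≥ 75 then 1 else 0) + (if s ≥ 90 then 1 else 0)
  let grade := match PySem.Str.pyGet? "DCBA" k with
    | some c => String.ofList [c]
    | none => ""
  (s, grade)

-- ===== PRECONDITION & SPEC =====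
-- Pre_ excludes findings containing a dict without the key "severity", on which Python A
-- (and B alike) raises KeyError.
def Pre_score_findings (findings : List (List (String × String))) : Prop :=
  ∀ f ∈ findings, "severity" ∈ f.map Prod.fst
instance (findings : List (List (String × String))) : Decidable (Pre_score_findings findings) := by unfold Pre_score_findings; infer_instance
def pvWitness_score_findings : (List (List (String × String))) :=
  [[("severity", "HIGH")], [("severity", "LOW"), ("id", "x")]]
def Spec_score_findings (findings : List (List (String × String))) (out : Int × String) : Prop := out = score_findings_alt findings
instance (findings : List (List (String × String))) (out : Int × String) : Decidable (Spec_score_findings findings out) := by unfold Spec_score_findings; infer_instance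

-- ===== CLAIM (what is proved, stated in full; the proofs are below) =====
def Claim_equal_score_findings : Prop := ∀ (findings : List (List (String × String))), Dom_score_findings findings → Pre_score_findings findings → Spec_score_findings findings (score_findings findings)

-- ===== LEMMAS AND PROOFS =====

-- A's subtraction loop equals the closed form over counts of the looked-up severities.
theorem score_loop_eq_counts (g : List (String × String) → String)
    (l : List (List (String × String))) (s : Int) :
    l.foldl (fun s f =>
      if g f = "HIGH" then s - 15
      else if g f = "MEDIUM" then s - 7
      else if g f = "LOW" then s - 2
      else s) s
    = s - 15 * ((l.map g).count "HIGH" : Int) - 7 * ((l.map g).count "MEDIUM" : Int)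
        - 2 * ((l.map g).count "LOW" : Int) := by
  induction l generalizing s with
  | nil => simp
  | cons x xs ih =>
    simp only [List.foldl_cons, List.map_cons, List.count_cons, ih]
    by_cases h1 : g x = "HIGH" <;> by_cases h2 : g x = "MEDIUM" <;> by_cases h3 : g x = "LOW" <;>
      simp_all <;> ring

-- A's grade ladder equals B's threshold-sum index into "DCBA".
theorem grade_ladder_eq_index (s : Int) :
    (if s ≥ 90 then "A" else if s ≥ 75 then "B" else if s ≥ 60 then "C" else "D")
    = (match PySem.Str.pyGet? "DCBA"
        ((if s ≥ 60 then 1 else 0) + (if s ≥ 75 then 1 else 0) + (if s ≥ 90 then 1 else 0) : Int) with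
      | some c => String.ofList [c]
      | none => "") := by
  by_cases h1 : s ≥ 90 <;> by_cases h2 : s ≥ 75 <;> by_cases h3 : s ≥ 60 <;>
    first
      | omega
      | (simp only [h1, h2, h3, if_pos, if_neg, not_false_iff]; decide)

-- ===== VERDICT (by name: the statement is the Claim_ definition above) =====
theorem score_findings_spec : Claim_equal_score_findings := by
  intro findings _ _
  unfold Spec_score_findings score_findings score_findings_alt
  simp only [score_loop_eq_counts, grade_ladder_eq_index]
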